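-- pv_equiv track=rewrite | github.com/shadiendo/GUI_SequenceFiltering | module_transfer_file.py | rearranging_the_subdictName
-- ===== SOURCE A (Python) =====
-- def rearranging_the_subdictName(sub_dict):
--     # 定义一个字典，用于保存每个属性对应的出现次数
--     dict_count = {}
--     # 定义一个新的字典，用于保存更新后的键值对
--     dict_file_new = {}
--     for key, value in sub_dict.items():
--         # 如果当前属性已经在dict_count中，则将计数器加1，并将属性名修改为属性名+计数器
--         if value in dict_count:
--             dict_count[value] += 1
--             new_value = f"{value}_{dict_count[value]}"
--         else:
--             # 否则，将计数器设置为0，并将属性名保持不变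
--             dict_count[value] = 0
--             new_value = value
--         # 将更新后的键值对保存到新的字典中
--         dict_file_new[key] = new_value
--     return dict_file_new
-- ===== SOURCE B (Python) =====
-- def rearranging_the_subdictName(sub_dict):
--     # Phase 1: group the keys by their value, in insertion order.
--     groups = {}
--     for key, value in sub_dict.items():
--         groups.setdefault(value, []).append(key)
--     # Phase 2: number each group's keys by occurrence index.
--     occ = {}
--     for value, keys in groups.items():
--         for i, key in enumerate(keys):
--             occ[key] = value if i == 0 else f"{value}_{i}"
--     # Reassemble in the original key order (every key of sub_dict is in occ).
--     return {key: occ[key] for key in sub_dict}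
-- ===== Notes on version B (the rewrite author's own statement) =====
-- stated objective: alternative
-- what changed: A's single pass with a running per-value counter is replaced by a two-phase computation: group the keys by value, number each group's keys with enumerate, then reassemble the dict in the original key order.
import Mathlib
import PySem

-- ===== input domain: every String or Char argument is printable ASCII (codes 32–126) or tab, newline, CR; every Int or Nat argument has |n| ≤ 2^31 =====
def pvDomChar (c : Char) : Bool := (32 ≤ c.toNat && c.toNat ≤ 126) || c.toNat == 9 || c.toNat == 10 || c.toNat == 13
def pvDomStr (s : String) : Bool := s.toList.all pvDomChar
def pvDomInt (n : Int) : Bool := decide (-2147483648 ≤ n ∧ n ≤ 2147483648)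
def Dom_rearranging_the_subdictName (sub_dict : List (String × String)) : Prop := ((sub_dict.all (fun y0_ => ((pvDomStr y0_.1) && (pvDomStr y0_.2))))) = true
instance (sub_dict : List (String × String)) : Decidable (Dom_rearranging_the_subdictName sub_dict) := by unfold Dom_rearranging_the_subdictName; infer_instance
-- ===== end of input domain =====

-- B re-implements A's running-counter pass as a group-by-value / number-each-group / reassemble
-- two-phase computation (objective: alternative decomposition, same asymptotic cost).

-- ===== PORT A =====
def rearranging_the_subdictName (sub_dict : List (String × String)) : List (String × String) :=
  -- dict_count / dict_file_new, one pass over sub_dict.items()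
  (sub_dict.foldl
    (fun (st : PySem.Dict String Int × PySem.Dict String String) kv =>
      match st.1.get? kv.2 with
      | some c =>
          (st.1.insert kv.2 (c + 1),
           st.2.insert kv.1 (kv.2 ++ "_" ++ PySem.Int.toStr (c + 1)))
      | none =>
          (st.1.insert kv.2 0, st.2.insert kv.1 kv.2))
    (PySem.Dict.empty, PySem.Dict.empty)).2.items

-- ===== PORT B =====
def rearranging_the_subdictName_alt (sub_dict : List (String × String)) : List (String × String) :=
  -- phase 1: groups.setdefault(value, []).append(key)  (= modify value [] (· ++ [key]))
  let groups : PySem.Dict String (List String) :=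
    sub_dict.foldl (fun g kv => g.modify kv.2 [] (fun ks => ks ++ [kv.1])) PySem.Dict.empty
  -- phase 2: number each group's keys by occurrence index
  let occ : PySem.Dict String String :=
    groups.items.foldl
      (fun o vks =>
        (PySem.List.enumerate vks.2 0).foldl
          (fun o ik =>
            o.insert ik.2 (if ik.1 = 0 then vks.1 else vks.1 ++ "_" ++ PySem.Int.toStr ik.1)) o)
      PySem.Dict.empty
  -- {key: occ[key] for key in sub_dict}; every key of sub_dict is in occ, so getD is exact here
  (sub_dict.foldl (fun r kv => r.insert kv.1 (occ.getD kv.1 "")) PySem.Dict.empty).items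

-- ===== PRECONDITION & SPEC =====
-- Pre_ excludes association lists with duplicate keys: they do not represent any Python dict
-- (dict construction collapses duplicates before A ever runs), so A's behaviour there is undefined.
def Pre_rearranging_the_subdictName (sub_dict : List (String × String)) : Prop :=
  (sub_dict.map (·.1)).Nodup
instance (sub_dict : List (String × String)) : Decidable (Pre_rearranging_the_subdictName sub_dict) := by
  unfold Pre_rearranging_the_subdictName; infer_instance
def pvWitness_rearranging_the_subdictName : (List (String × String)) :=
  [("a", "x"), ("b", "x"), ("c", "y")]
def Spec_rearranging_the_subdictName (sub_dict : List (String × String)) (out : List (String × String)) : Prop := out = rearranging_the_subdictName_alt sub_dict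
instance (sub_dict : List (String × String)) (out : List (String × String)) : Decidable (Spec_rearranging_the_subdictName sub_dict out) := by unfold Spec_rearranging_the_subdictName; infer_instance

-- ===== CLAIM (what is proved, stated in full; the proofs are below) =====
def Claim_equal_rearranging_the_subdictName : Prop := ∀ (sub_dict : List (String × String)), Dom_rearranging_the_subdictName sub_dict → Pre_rearranging_the_subdictName sub_dict → Spec_rearranging_the_subdictName sub_dict (rearranging_the_subdictName sub_dict)

-- ===== LEMMAS AND PROOFS =====

-- the numbered value of the (i+1)-st occurrence of v
def pvNum (v : String) (i : Int) : String := if i = 0 then v else v ++ "_" ++ PySem.Int.toStr i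

-- reference result: each entry's value numbered by the count of equal values seen before it
def pvRef (seen : List String) : List (String × String) → List (String × String)
  | [] => []
  | (k, v) :: t => (k, pvNum v (seen.count v : Int)) :: pvRef (seen ++ [v]) t

-- the keys of the entries of l whose value is v, in order
def pvGK (l : List (String × String)) (v : String) : List String :=
  (l.filter (fun p => p.2 == v)).map (·.1)

lemma pv_key_fun {l : List (String × String)} (hnd : (l.map (·.1)).Nodup)
    {k a b : String} (ha : (k, a) ∈ l) (hb : (k, b) ∈ l) : a = b := by
  induction l with
  | nil => cases ha
  | cons p t ih =>
      simp only [List.map_cons, List.nodup_cons] at hnd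
      rcases List.mem_cons.mp ha with ha' | ha' <;> rcases List.mem_cons.mp hb with hb' | hb'
      · exact congrArg Prod.snd (ha'.trans hb'.symm)
      · exact absurd (List.mem_map_of_mem hb') (ha' ▸ hnd.1)
      · exact absurd (List.mem_map_of_mem ha') (hb' ▸ hnd.1)
      · exact ih hnd.2 ha' hb'

lemma pvGK_nodup {l : List (String × String)} (hnd : (l.map (·.1)).Nodup) (v : String) :
    (pvGK l v).Nodup := by
  have hs : (l.filter (fun p => p.2 == v)).Sublist l := List.filter_sublist
  exact (hs.map (·.1)).nodup hnd

-- ---- A-side loop invariant ----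
lemma pvA_loop (l : List (String × String)) :
    ∀ (seen : List String) (dc : PySem.Dict String Int) (dn : PySem.Dict String String),
    (∀ v, dc.get? v = if seen.count v = 0 then none else some ((seen.count v : Int) - 1)) →
    (l.map (·.1)).Nodup →
    (∀ p ∈ l, dn.contains p.1 = false) →
    (l.foldl
      (fun (st : PySem.Dict String Int × PySem.Dict String String) kv =>
        match st.1.get? kv.2 with
        | some c =>
            (st.1.insert kv.2 (c + 1),
             st.2.insert kv.1 (kv.2 ++ "_" ++ PySem.Int.toStr (c + 1)))
        | none =>
            (st.1.insert kv.2 0, st.2.insert kv.1 kv.2))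
      (dc, dn)).2.items = dn.items ++ pvRef seen l := by
  induction l with
  | nil => intro seen dc dn _ _ _; simp [pvRef]
  | cons p t ih =>
      intro seen dc dn Hdc Hnd Hfresh
      obtain ⟨k, v⟩ := p
      simp only [List.map_cons, List.nodup_cons] at Hnd
      have hkfresh : dn.contains k = false := Hfresh (k, v) List.mem_cons_self
      have hcount : ∀ v', (seen ++ [v]).count v' = seen.count v' + (if v' = v then 1 else 0) := by
        intro v'
        by_cases h : v' = v
        · subst h; simp [List.count_append]
        · simp [List.count_append, List.count_singleton, h,
            beq_eq_false_iff_ne.mpr (fun hh => h hh.symm)]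
      have hfresh' : ∀ (w : String), ∀ q ∈ t, (dn.insert k w).contains q.1 = false := by
        intro w q hq
        rw [PySem.Dict.contains_insert]
        have h1 : (q.1 == k) = false :=
          beq_eq_false_iff_ne.mpr (fun h => Hnd.1 (h ▸ List.mem_map_of_mem hq))
        rw [h1, Hfresh q (List.mem_cons_of_mem _ hq)]
        rfl
      simp only [List.foldl_cons]
      by_cases h0 : seen.count v = 0
      · have hget : dc.get? v = none := by rw [Hdc v, if_pos h0]
        simp only [hget]
        rw [ih (seen ++ [v]) _ _ ?_ Hnd.2 (hfresh' v)]
        · rw [PySem.Dict.items_insert_of_not_contains dn v hkfresh]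
          simp [pvRef, pvNum, h0]
        · intro v'
          rw [hcount v']
          by_cases h : v' = v
          · subst h
            rw [PySem.Dict.get?_insert_self]
            simp [h0]
          · rw [PySem.Dict.get?_insert_of_ne _ _ h, Hdc v']
            simp [h]
      · have hget : dc.get? v = some ((seen.count v : Int) - 1) := by rw [Hdc v, if_neg h0]
        simp only [hget]
        rw [ih (seen ++ [v]) _ _ ?_ Hnd.2 (hfresh' _)]
        · rw [PySem.Dict.items_insert_of_not_contains dn _ hkfresh]
          have hc : ((seen.count v : Int) - 1) + 1 = (seen.count v : Int) := by ring
          have hnum : pvNum v (seen.count v : Int)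
              = v ++ "_" ++ PySem.Int.toStr (((seen.count v : Int) - 1) + 1) := by
            rw [hc, pvNum, if_neg (by exact_mod_cast h0)]
          simp [pvRef, hnum]
        · intro v'
          rw [hcount v']
          by_cases h : v' = v
          · subst h
            rw [PySem.Dict.get?_insert_self]
            rw [if_neg (by omega)]
            congr 1
            simp
          · rw [PySem.Dict.get?_insert_of_ne _ _ h, Hdc v']
            simp [h]

-- ---- B-side: the groups dict ----
lemma pvB_groups_getD (l : List (String × String)) (v : String) :
    (l.foldl (fun g kv => g.modify kv.2 [] (fun ks => ks ++ [kv.1]))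
      (PySem.Dict.empty : PySem.Dict String (List String))).getD v [] = pvGK l v := by
  have h1 : (l.map Prod.swap).foldl
      (fun (d : PySem.Dict String (List String)) p => d.modify p.1 [] fun x => x ++ [p.2])
      PySem.Dict.empty
      = l.foldl (fun g kv => g.modify kv.2 [] fun ks => ks ++ [kv.1]) PySem.Dict.empty :=
    List.foldl_map
  rw [← h1, PySem.Dict.getD_foldl_modify_append]
  simp [pvGK, List.filter_map, List.map_map, Function.comp_def, Prod.swap]

lemma pvB_groups_items (l : List (String × String)) :
    (l.foldl (fun g kv => g.modify kv.2 [] (fun ks => ks ++ [kv.1]))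
      (PySem.Dict.empty : PySem.Dict String (List String))).items
    = (PySem.Set.ofList (l.map (·.2))).map (fun v => (v, pvGK l v)) := by
  have hnd : (l.foldl (fun g kv => g.modify kv.2 [] (fun ks => ks ++ [kv.1]))
      (PySem.Dict.empty : PySem.Dict String (List String))).keys.Nodup := by
    have := PySem.Dict.nodup_keys_foldl_modify_key l (fun kv => kv.2) []
      (fun _ kv => fun ks => ks ++ [kv.1]) PySem.Dict.empty
      (by rw [PySem.Dict.keys_empty]; exact List.nodup_nil)
    exact this
  rw [PySem.Dict.items_eq_map_keys _ hnd []]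
  have hkeys : (l.foldl (fun g kv => g.modify kv.2 [] (fun ks => ks ++ [kv.1]))
      (PySem.Dict.empty : PySem.Dict String (List String))).keys
      = PySem.Set.ofList (l.map (·.2)) := by
    have := PySem.Dict.keys_foldl_modify_key l (fun kv => kv.2) []
      (fun _ kv => fun ks => ks ++ [kv.1]) PySem.Dict.empty
    rw [this, PySem.Dict.keys_empty]
    rfl
  rw [hkeys]
  exact List.map_congr_left (fun v _ => by rw [pvB_groups_getD])

-- ---- B-side: numbering one group ----
lemma pv_ng_notmem (v : String) (ks : List String) (s : Int) (o : PySem.Dict String String)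
    (k : String) (hk : k ∉ ks) :
    ((PySem.List.enumerate ks s).foldl
      (fun o ik => o.insert ik.2 (if ik.1 = 0 then v else v ++ "_" ++ PySem.Int.toStr ik.1)) o).get? k
    = o.get? k := by
  induction ks generalizing s o with
  | nil => simp [PySem.List.enumerate]
  | cons k0 t ih =>
      rw [PySem.List.enumerate_cons]
      simp only [List.foldl_cons]
      rw [ih (s + 1) _ (fun h => hk (List.mem_cons_of_mem _ h))]
      exact PySem.Dict.get?_insert_of_ne o _ (fun h => hk (h ▸ List.mem_cons_self))

lemma pv_ng_mem (v : String) (ks : List String) (s : Int) (o : PySem.Dict String String)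
    (k : String) (hnd : ks.Nodup) (hk : k ∈ ks) :
    ((PySem.List.enumerate ks s).foldl
      (fun o ik => o.insert ik.2 (if ik.1 = 0 then v else v ++ "_" ++ PySem.Int.toStr ik.1)) o).get? k
    = some (pvNum v (s + (ks.idxOf k : Int))) := by
  induction ks generalizing s o with
  | nil => cases hk
  | cons k0 t ih =>
      rw [PySem.List.enumerate_cons]
      simp only [List.foldl_cons]
      rcases List.nodup_cons.mp hnd with ⟨h0, hndt⟩
      by_cases hkt : k ∈ t
      · have hne : k ≠ k0 := fun h => h0 (h ▸ hkt)
        rw [ih (s + 1) _ hndt hkt]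
        have : List.idxOf k (k0 :: t) = List.idxOf k t + 1 := by
          have hb : (k0 == k) = false := beq_eq_false_iff_ne.mpr (Ne.symm hne)
          simp [List.idxOf_cons, hb]
        rw [this]
        congr 1
        have : (s + 1) + (List.idxOf k t : Int) = s + ((List.idxOf k t + 1 : Nat) : Int) := by
          push_cast; ring
        rw [this]
      · have hk0 : k = k0 := by
          rcases List.mem_cons.mp hk with h | h
          · exact h
          · exact absurd h hkt
        subst hk0
        rw [pv_ng_notmem v t (s + 1) _ k hkt, PySem.Dict.get?_insert_self]
        simp [pvNum, List.idxOf_cons_self]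

-- ---- B-side: folding over all groups ----
lemma pv_gfold_notmem (gl : List (String × List String)) (o : PySem.Dict String String)
    (k : String) (h : ∀ p ∈ gl, k ∉ p.2) :
    (gl.foldl
      (fun o vks =>
        (PySem.List.enumerate vks.2 0).foldl
          (fun o ik =>
            o.insert ik.2 (if ik.1 = 0 then vks.1 else vks.1 ++ "_" ++ PySem.Int.toStr ik.1)) o)
      o).get? k = o.get? k := by
  induction gl generalizing o with
  | nil => rfl
  | cons p t ih =>
      simp only [List.foldl_cons]
      rw [ih _ (fun q hq => h q (List.mem_cons_of_mem _ hq))]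
      exact pv_ng_notmem p.1 p.2 0 o k (h p List.mem_cons_self)

lemma pv_gfold_mem (gl : List (String × List String)) (o : PySem.Dict String String)
    (k v0 : String) (ks0 : List String) (hmem : (v0, ks0) ∈ gl)
    (hnd : (gl.map (·.1)).Nodup) (hks : ks0.Nodup) (hk : k ∈ ks0)
    (hother : ∀ p ∈ gl, p.1 ≠ v0 → k ∉ p.2) :
    (gl.foldl
      (fun o vks =>
        (PySem.List.enumerate vks.2 0).foldl
          (fun o ik =>
            o.insert ik.2 (if ik.1 = 0 then vks.1 else vks.1 ++ "_" ++ PySem.Int.toStr ik.1)) o)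
      o).get? k = some (pvNum v0 (ks0.idxOf k : Int)) := by
  induction gl generalizing o with
  | nil => cases hmem
  | cons p t ih =>
      obtain ⟨pv, pks⟩ := p
      simp only [List.map_cons, List.nodup_cons] at hnd
      simp only [List.foldl_cons]
      rcases List.mem_cons.mp hmem with he | ht
      · rw [Prod.mk.injEq] at he
        obtain ⟨rfl, rfl⟩ := he
        rw [pv_gfold_notmem t _ k (fun q hq hq2 => by
          exact hother q (List.mem_cons_of_mem _ hq)
            (fun h => hnd.1 (h ▸ List.mem_map_of_mem hq)) hq2)]
        have := pv_ng_mem v0 ks0 0 o k hks hk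
        rw [this]
        simp
      · have hpne : pv ≠ v0 := by
          intro h
          exact hnd.1 (h ▸ (List.mem_map_of_mem ht : (v0, ks0).1 ∈ t.map (·.1)))
        exact ih _ ht hnd.2 (fun q hq => hother q (List.mem_cons_of_mem _ hq))

-- ---- B-side: assembling the result in original key order ----
lemma pvB_assemble (l2 l1 : List (String × String))
    (hnd : (((l1 ++ l2).map (·.1))).Nodup) :
    l2.map (fun p => (p.1,
      (((PySem.Set.ofList ((l1 ++ l2).map (·.2))).map (fun v => (v, pvGK (l1 ++ l2) v))).foldl
        (fun o vks =>
          (PySem.List.enumerate vks.2 0).foldl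
            (fun o ik =>
              o.insert ik.2 (if ik.1 = 0 then vks.1 else vks.1 ++ "_" ++ PySem.Int.toStr ik.1)) o)
        PySem.Dict.empty).getD p.1 ""))
    = pvRef (l1.map (·.2)) l2 := by
  induction l2 generalizing l1 with
  | nil => rfl
  | cons p t ih =>
      obtain ⟨k, v⟩ := p
      have hkvL : (k, v) ∈ l1 ++ (k, v) :: t := by simp
      have hknotl1 : k ∉ l1.map (·.1) := by
        have hnd' := hnd
        rw [List.map_append, List.map_cons] at hnd'
        exact fun h => (List.disjoint_of_nodup_append hnd') h List.mem_cons_self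
      have hget : (((PySem.Set.ofList (((l1 ++ (k, v) :: t)).map (·.2))).map
            (fun u => (u, pvGK (l1 ++ (k, v) :: t) u))).foldl
          (fun o vks =>
            (PySem.List.enumerate vks.2 0).foldl
              (fun o ik =>
                o.insert ik.2 (if ik.1 = 0 then vks.1 else vks.1 ++ "_" ++ PySem.Int.toStr ik.1)) o)
          PySem.Dict.empty).get? k
          = some (pvNum v ((pvGK (l1 ++ (k, v) :: t) v).idxOf k : Int)) := by
        apply pv_gfold_mem
        · exact List.mem_map_of_mem ((PySem.Set.mem_ofList _ _).mpr (List.mem_map_of_mem hkvL))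
        · rw [List.map_map]
          have : ((fun x => x.1) ∘ fun u => (u, pvGK (l1 ++ (k, v) :: t) u)) = id := rfl
          rw [this, List.map_id]
          exact PySem.Set.nodup_ofList _
        · exact pvGK_nodup hnd v
        · exact List.mem_map_of_mem (List.mem_filter.mpr ⟨hkvL, by simp⟩)
        · intro q hq hne hkmem
          obtain ⟨v', _, rfl⟩ := List.mem_map.mp hq
          obtain ⟨w, hwf, hw1⟩ := List.mem_map.mp hkmem
          obtain ⟨hwL, hw2⟩ := List.mem_filter.mp hwf
          have hw2' : w.2 = v' := by simpa using hw2
          have hwkv : (k, v') ∈ l1 ++ (k, v) :: t := by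
            have : w = (k, v') := Prod.ext hw1 hw2'
            exact this ▸ hwL
          exact hne (pv_key_fun hnd hwkv hkvL)
      have hidx : (pvGK (l1 ++ (k, v) :: t) v).idxOf k = (l1.map (·.2)).count v := by
        have hsplit : pvGK (l1 ++ (k, v) :: t) v = pvGK l1 v ++ (k :: pvGK t v) := by
          simp [pvGK, List.filter_append]
        have hknot : k ∉ pvGK l1 v := by
          intro h
          obtain ⟨w, hw, hw1⟩ := List.mem_map.mp h
          exact hknotl1 (hw1 ▸ List.mem_map_of_mem (List.mem_of_mem_filter hw))
        rw [hsplit, List.idxOf_append, if_neg hknot, List.idxOf_cons_self]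
        simp [pvGK, List.count, List.countP_map, Function.comp_def,
          ← List.countP_eq_length_filter]
      simp only [List.map_cons, pvRef]
      congr 1
      · rw [PySem.Dict.getD_eq_get?_getD, hget, hidx]
        rfl
      · have hEq : (l1 ++ [(k, v)]) ++ t = l1 ++ (k, v) :: t := by simp
        have := ih (l1 ++ [(k, v)]) (by rw [hEq]; exact hnd)
        rw [hEq] at this
        rw [List.map_append] at this
        simpa using this

lemma pvB_eq_ref (l : List (String × String)) (hnd : (l.map (·.1)).Nodup) :
    rearranging_the_subdictName_alt l = pvRef [] l := by
  dsimp only [rearranging_the_subdictName_alt]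
  rw [pvB_groups_items l]
  rw [PySem.Dict.items_foldl_insert_fresh l (fun p => p.1) _ PySem.Dict.empty
    (fun a _ => PySem.Dict.contains_empty a.1) hnd]
  rw [show (PySem.Dict.empty : PySem.Dict String String).items = [] from rfl]
  have := pvB_assemble l [] (by simpa using hnd)
  simpa using this

-- ===== VERDICT (by name: the statement is the Claim_ definition above) =====
theorem rearranging_the_subdictName_spec : Claim_equal_rearranging_the_subdictName := by
  intro l _ hpre
  unfold Spec_rearranging_the_subdictName
  rw [pvB_eq_ref l hpre]
  have := pvA_loop l [] PySem.Dict.empty PySem.Dict.empty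
    (by intro v; simp [PySem.Dict.get?_empty]) hpre (by intro p _; simp [PySem.Dict.contains_empty])
  simpa [rearranging_the_subdictName] using this
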